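-- pv_equiv track=rewrite | github.com/bedbugs-bit/Leetcode-Python | graphs/social_media_recommendations.py | get_recommended_friends
-- ===== SOURCE A (Python) =====
-- from collections import defaultdict, Counter
--
-- def get_recommended_friends(num, friendships):
--     # Build the adjacency list
--     graph = defaultdict(set)
--     for u, v in friendships:
--         graph[u].add(v)
--         graph[v].add(u)
--
--     # List to store recommendations for each user
--     recs_list = [-1] * num
--
--     # Iterate over each user
--     for i in range(num):
--         # Counter to count potential friends and their common friend count
--         potential_friend_count_list = Counter()
--
--         # Iterate over the user's friends
--         for friend in graph[i]:
--             # Look at the friend's friends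
--             for second_friend in graph[friend]:
--                 # Add to counter if valid recommendation
--                 if second_friend != i and second_friend not in graph[i]:
--                     potential_friend_count_list[second_friend] += 1
--
--         # Variables to track the best recommendation
--         highest_num_common_friends = -1
--         best_recommendation = -1
--
--         # Find the best recommendation
--         for candidate, count in potential_friend_count_list.items():
--             if (count > highest_num_common_friends or
--                     (count == highest_num_common_friends and candidate < best_recommendation)):
--                 highest_num_common_friends = count
--                 best_recommendation = candidate
--
--         # Update the recommendation list for this user
--         recs_list[i] = best_recommendation
--
--     return recs_list
-- ===== SOURCE B (Python) =====
-- def get_recommended_friends(num, friendships):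
--     # Directed edge list (each friendship in both directions), then a one-pass adjacency build.
--     edges = friendships + [(v, u) for u, v in friendships]
--     graph = {}
--     for u, v in edges:
--         graph.setdefault(u, set()).add(v)
--     nodes = list(graph)
--
--     def best(i):
--         adj = graph.get(i, set())
--         scored = [(-len(adj & graph[j]), j) for j in nodes
--                   if j != i and j not in adj and not adj.isdisjoint(graph[j])]
--         return min(scored)[1] if scored else -1
--
--     return [best(i) for i in range(num)]
-- ===== Notes on version B (the rewrite author's own statement) =====
-- stated objective: alternative
-- what changed: Replaces A's per-user friends-of-friends traversal that populates a Counter and then scans its items with: a one-pass adjacency build over the symmetrised edge list, then for each user a list comprehension scoring every non-adjacent graph node j by the set intersection adj(i) & adj(j) (keyed as (-count, j)) and taking min() of the scored tuples, so the best (max count, then smallest id) falls out of tuple ordering instead of a running-best scan.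
import Mathlib
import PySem

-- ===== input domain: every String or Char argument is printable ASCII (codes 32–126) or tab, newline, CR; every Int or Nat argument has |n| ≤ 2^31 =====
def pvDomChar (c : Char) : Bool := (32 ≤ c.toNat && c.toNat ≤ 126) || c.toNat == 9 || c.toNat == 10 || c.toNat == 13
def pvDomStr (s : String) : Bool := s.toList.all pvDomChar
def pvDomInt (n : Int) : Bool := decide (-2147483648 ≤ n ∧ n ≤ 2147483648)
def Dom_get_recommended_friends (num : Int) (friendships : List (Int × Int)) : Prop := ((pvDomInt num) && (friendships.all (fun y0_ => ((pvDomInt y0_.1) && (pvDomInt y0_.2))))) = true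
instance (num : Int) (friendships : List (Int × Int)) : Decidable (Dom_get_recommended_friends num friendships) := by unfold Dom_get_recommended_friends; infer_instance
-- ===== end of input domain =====

-- B replaces A's per-user friends-of-friends Counter traversal by a symmetrised-edge-list adjacency
-- build and, per user, min() over (-|adj(i) & adj(j)|, j) tuples for every non-adjacent node j;
-- same return values.

-- ===== PORT A =====
-- defaultdict(set): graph[u].add(v) is modify u ∅ (·.add v); every read graph[x] yields getD x ∅
-- (the empty entries the defaultdict inserts on reads never change any later read).
def pvGraphA (friendships : List (Int × Int)) : PySem.Dict Int (PySem.Set Int) :=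
  friendships.foldl
    (fun g p => (g.modify p.1 PySem.Set.empty (fun s => PySem.Set.add s p.2)).modify p.2
        PySem.Set.empty (fun s => PySem.Set.add s p.1))
    PySem.Dict.empty

-- one iteration of A's outer loop: Counter over friends-of-friends, then the best-candidate scan
-- (state of the scan = (best_recommendation, highest_num_common_friends))
def pvRecA (g : PySem.Dict Int (PySem.Set Int)) (i : Int) : Int :=
  let adj := g.getD i PySem.Set.empty
  let counter : PySem.Dict Int Int := adj.foldl (fun c f =>
      (g.getD f PySem.Set.empty).foldl (fun c s =>
        if s ≠ i ∧ s ∉ adj then c.modify s 0 (· + 1) else c) c) PySem.Dict.empty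
  (counter.items.foldl
    (fun st p => if p.2 > st.2 ∨ (p.2 = st.2 ∧ p.1 < st.1) then (p.1, p.2) else st)
    ((-1 : Int), (-1 : Int))).1

def get_recommended_friends (num : Int) (friendships : List (Int × Int)) : List Int :=
  let graph := pvGraphA friendships
  let recs := PySem.List.pyRepeat [(-1 : Int)] num
  (PySem.List.pyRange 0 num 1).foldl (fun r i => PySem.List.pySetD r i (pvRecA graph i)) recs

-- ===== PORT B =====
-- edges = friendships + [(v, u) for u, v in friendships]
def pvEdges (friendships : List (Int × Int)) : List (Int × Int) :=
  friendships ++ friendships.map (fun p => (p.2, p.1))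

-- graph.setdefault(u, set()).add(v) mutates the stored set in place: modify u ∅ (·.add v)
def pvGraphB (friendships : List (Int × Int)) : PySem.Dict Int (PySem.Set Int) :=
  (pvEdges friendships).foldl
    (fun g p => g.modify p.1 PySem.Set.empty (fun s => PySem.Set.add s p.2))
    PySem.Dict.empty

-- def best(i): the scored comprehension over nodes = list(graph), then min(scored)[1] if scored else -1
-- (min over int pairs compares lexicographically: PySem.List.min2? with keys fst, snd)
def pvBest (g : PySem.Dict Int (PySem.Set Int)) (i : Int) : Int :=
  let adj := g.getD i PySem.Set.empty
  let scored := (g.keys.filter (fun j =>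
      decide (j ≠ i) && !(PySem.Set.contains adj j)
        && !(PySem.Set.isdisjoint adj (g.getD j PySem.Set.empty)))).map
    (fun j => (-(PySem.Set.len (PySem.Set.inter adj (g.getD j PySem.Set.empty))), j))
  match PySem.List.min2? scored Prod.fst Prod.snd with
  | some p => p.2
  | none => -1

def get_recommended_friends_alt (num : Int) (friendships : List (Int × Int)) : List Int :=
  let graph := pvGraphB friendships
  (PySem.List.pyRange 0 num 1).map (fun i => pvBest graph i)

-- ===== PRECONDITION & SPEC =====
def Spec_get_recommended_friends (num : Int) (friendships : List (Int × Int)) (out : List Int) : Prop := out = get_recommended_friends_alt num friendships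
instance (num : Int) (friendships : List (Int × Int)) (out : List Int) : Decidable (Spec_get_recommended_friends num friendships out) := by unfold Spec_get_recommended_friends; infer_instance

-- ===== CLAIM (what is proved, stated in full; the proofs are below) =====
def Claim_equal_get_recommended_friends : Prop := ∀ (num : Int) (friendships : List (Int × Int)), Dom_get_recommended_friends num friendships → Spec_get_recommended_friends num friendships (get_recommended_friends num friendships)

-- ===== LEMMAS AND PROOFS =====

-- A's best-candidate update: keep the (max count, then min id) pair
def pvStep (st p : Int × Int) : Int × Int :=
  if p.2 > st.2 ∨ (p.2 = st.2 ∧ p.1 < st.1) then p else st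

theorem pvStep_rcomm (st p q : Int × Int) :
    pvStep (pvStep st p) q = pvStep (pvStep st q) p := by
  obtain ⟨s1, s2⟩ := st; obtain ⟨p1, p2⟩ := p; obtain ⟨q1, q2⟩ := q
  simp only [pvStep]
  split_ifs <;> simp_all [Prod.mk.injEq] <;> omega

theorem pvFoldl_pvStep_perm {L1 L2 : List (Int × Int)} (h : L1.Perm L2) (b : Int × Int) :
    L1.foldl pvStep b = L2.foldl pvStep b :=
  @List.Perm.foldl_eq _ _ pvStep _ _ ⟨pvStep_rcomm⟩ h b

-- B's min() over (-count, id) tuples, as the fold PySem.List.min2? performs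
def pvMStep (acc : Option (Int × Int)) (x : Int × Int) : Option (Int × Int) :=
  match acc with
  | none => some x
  | some m =>
    if (decide (x.1 < m.1) || !decide (m.1 < x.1) && decide (x.2 < m.2)) = true
    then some x else some m

def pvExtract (o : Option (Int × Int)) : Int :=
  match o with
  | some p => p.2
  | none => -1

theorem pvMin2_eq (xs : List (Int × Int)) :
    PySem.List.min2? xs Prod.fst Prod.snd = xs.foldl pvMStep none := by
  simp only [PySem.List.min2?]
  exact PySem.List.foldl_congr_mem xs _ _ none (fun acc x _ => by cases acc <;> rfl)

-- A's running-best scan and B's min-of-(-count, id)-tuples fold walk the same list in lockstep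
theorem pvMinFoldAux (c : Int → Int) :
    ∀ (L : List Int) (st : Int × Int) (acc : Option (Int × Int)),
    (∀ k ∈ L, 1 ≤ c k) →
    ((acc = none ∧ st = (-1, -1)) ∨ (acc = some (-st.2, st.1) ∧ 1 ≤ st.2)) →
    (((L.map (fun k => (-(c k), k))).foldl pvMStep acc = none ∧
        (L.map (fun k => (k, c k))).foldl pvStep st = (-1, -1)) ∨
      ((L.map (fun k => (-(c k), k))).foldl pvMStep acc
          = some (-((L.map (fun k => (k, c k))).foldl pvStep st).2,
                  ((L.map (fun k => (k, c k))).foldl pvStep st).1) ∧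
        1 ≤ ((L.map (fun k => (k, c k))).foldl pvStep st).2)) := by
  intro L
  induction L with
  | nil => intro st acc _ hinv; simpa using hinv
  | cons k t ih =>
      intro st acc h hinv
      have hk : 1 ≤ c k := h k (by simp)
      simp only [List.map_cons, List.foldl_cons]
      apply ih _ _ (fun x hx => h x (by simp [hx]))
      rcases hinv with ⟨hacc, hst⟩ | ⟨hacc, hge⟩
      · subst hacc; subst hst
        have hst' : pvStep ((-1 : Int), (-1 : Int)) (k, c k) = (k, c k) := by
          unfold pvStep
          rw [if_pos]
          left
          show c k > (-1 : Int)
          omega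
        right
        rw [hst']
        exact ⟨rfl, hk⟩
      · subst hacc
        obtain ⟨s1, s2⟩ := st
        simp only at hge
        by_cases hcond : c k > s2 ∨ (c k = s2 ∧ k < s1)
        · have hbt : (decide ((-(c k) : Int) < -s2)
              || !decide ((-s2 : Int) < -(c k)) && decide (k < s1)) = true := by
            simp only [Bool.or_eq_true, Bool.and_eq_true, decide_eq_true_eq,
              Bool.not_eq_true', decide_eq_false_iff_not]
            omega
          have hst' : pvStep (s1, s2) (k, c k) = (k, c k) := by
            unfold pvStep
            rw [if_pos]
            exact hcond
          have hacc' : pvMStep (some (-s2, s1)) (-(c k), k) = some (-(c k), k) := by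
            show (if (decide ((-(c k) : Int) < -s2)
                || !decide ((-s2 : Int) < -(c k)) && decide (k < s1)) = true
              then some ((-(c k) : Int), k) else some ((-s2 : Int), s1)) = some (-(c k), k)
            rw [if_pos hbt]
          right
          rw [hst', hacc']
          exact ⟨rfl, hk⟩
        · have hbf : ¬ ((decide ((-(c k) : Int) < -s2)
              || !decide ((-s2 : Int) < -(c k)) && decide (k < s1)) = true) := by
            simp only [Bool.or_eq_true, Bool.and_eq_true, decide_eq_true_eq,
              Bool.not_eq_true', decide_eq_false_iff_not]
            omega
          have hst' : pvStep (s1, s2) (k, c k) = (s1, s2) := by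
            unfold pvStep
            rw [if_neg]
            exact hcond
          have hacc' : pvMStep (some (-s2, s1)) (-(c k), k) = some (-s2, s1) := by
            show (if (decide ((-(c k) : Int) < -s2)
                || !decide ((-s2 : Int) < -(c k)) && decide (k < s1)) = true
              then some ((-(c k) : Int), k) else some ((-s2 : Int), s1)) = some (-s2, s1)
            rw [if_neg hbf]
          right
          rw [hst', hacc']
          exact ⟨rfl, hge⟩

theorem pvMinFold (c : Int → Int) (L : List Int) (h : ∀ k ∈ L, 1 ≤ c k) :
    ((L.map (fun k => (k, c k))).foldl pvStep ((-1 : Int), (-1 : Int))).1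
      = pvExtract (PySem.List.min2? (L.map (fun k => (-(c k), k))) Prod.fst Prod.snd) := by
  rw [pvMin2_eq]
  have := pvMinFoldAux c L ((-1 : Int), (-1 : Int)) none h (Or.inl ⟨rfl, rfl⟩)
  rcases this with ⟨hacc, hst⟩ | ⟨hacc, -⟩
  · rw [hacc, hst]
    rfl
  · rw [hacc]
    rfl

-- generic facts about the one-sided adjacency update  g.modify p.1 ∅ (·.add p.2)  folded over an edge list
def pvAdd1 (g : PySem.Dict Int (PySem.Set Int)) (p : Int × Int) : PySem.Dict Int (PySem.Set Int) :=
  g.modify p.1 PySem.Set.empty (fun s => PySem.Set.add s p.2)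

theorem pvKeys_modify_mem (g : PySem.Dict Int (PySem.Set Int)) (k k' : Int) (f : PySem.Set Int → PySem.Set Int) :
    k' ∈ (g.modify k PySem.Set.empty f).keys ↔ k' = k ∨ k' ∈ g.keys := by
  rw [PySem.Dict.keys_modify, PySem.Dict.mem_keys_insert]

theorem pvKeys_modify_nodup (g : PySem.Dict Int (PySem.Set Int)) (k : Int) (f : PySem.Set Int → PySem.Set Int)
    (h : g.keys.Nodup) : (g.modify k PySem.Set.empty f).keys.Nodup := by
  rw [PySem.Dict.keys_modify]; exact PySem.Dict.nodup_keys_insert _ _ _ h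

theorem pvFold1_keys_nodup (l : List (Int × Int)) :
    ∀ g : PySem.Dict Int (PySem.Set Int), g.keys.Nodup → (l.foldl pvAdd1 g).keys.Nodup := by
  induction l with
  | nil => exact fun g h => h
  | cons p t ih => exact fun g h => ih _ (pvKeys_modify_nodup _ _ _ h)

theorem pvFold1_adj_nodup (l : List (Int × Int)) :
    ∀ g : PySem.Dict Int (PySem.Set Int), (∀ b : Int, (g.getD b PySem.Set.empty).Nodup) →
      ∀ b : Int, ((l.foldl pvAdd1 g).getD b PySem.Set.empty).Nodup := by
  induction l with
  | nil => exact fun g h => h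
  | cons p t ih =>
      intro g h
      apply ih
      intro b
      rw [pvAdd1, PySem.Dict.getD_modify]
      split_ifs with hb
      · exact PySem.Set.nodup_add _ _ (h p.1)
      · exact h b

theorem pvFold1_mem (l : List (Int × Int)) :
    ∀ (g : PySem.Dict Int (PySem.Set Int)) (a b : Int),
      a ∈ (l.foldl pvAdd1 g).getD b PySem.Set.empty ↔
        a ∈ g.getD b PySem.Set.empty ∨ (b, a) ∈ l := by
  induction l with
  | nil => simp
  | cons p t ih =>
      intro g a b
      rw [List.foldl_cons, ih]
      have hbase : a ∈ (pvAdd1 g p).getD b PySem.Set.empty ↔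
          a ∈ g.getD b PySem.Set.empty ∨ (b = p.1 ∧ a = p.2) := by
        rw [pvAdd1, PySem.Dict.getD_modify]
        split_ifs with hb
        · subst hb; rw [PySem.Set.mem_add]; tauto
        · tauto
      rw [hbase, List.mem_cons, Prod.ext_iff]
      tauto

theorem pvFold1_keys (l : List (Int × Int)) :
    ∀ (g : PySem.Dict Int (PySem.Set Int)) (k : Int),
      k ∈ (l.foldl pvAdd1 g).keys ↔ k ∈ g.keys ∨ ∃ p ∈ l, k = p.1 := by
  induction l with
  | nil => simp
  | cons p t ih =>
      intro g k
      rw [List.foldl_cons, ih, pvAdd1, pvKeys_modify_mem]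
      simp only [List.mem_cons]
      constructor
      · rintro ((h | h) | ⟨q, hq, rfl⟩)
        · exact Or.inr ⟨p, Or.inl rfl, h⟩
        · exact Or.inl h
        · exact Or.inr ⟨q, Or.inr hq, rfl⟩
      · rintro (h | ⟨q, (rfl | hq), rfl⟩)
        · exact Or.inl (Or.inr h)
        · exact Or.inl (Or.inl rfl)
        · exact Or.inr ⟨q, hq, rfl⟩

-- A's two-sided update is pvAdd1 folded over each edge and its reverse
theorem pvGraphA_eq_fold1 (friendships : List (Int × Int)) :
    pvGraphA friendships =
      (friendships.flatMap (fun p => [p, (p.2, p.1)])).foldl pvAdd1 PySem.Dict.empty := by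
  rw [pvGraphA]
  induction friendships using List.reverseRecOn with
  | nil => rfl
  | append_singleton t p ih =>
      rw [List.foldl_append, ih, List.flatMap_append, List.foldl_append]
      rfl

theorem pvGraphA_mem (friendships : List (Int × Int)) (a b : Int) :
    a ∈ (pvGraphA friendships).getD b PySem.Set.empty ↔
      (b, a) ∈ friendships ∨ (a, b) ∈ friendships := by
  rw [pvGraphA_eq_fold1, pvFold1_mem]
  simp only [PySem.Dict.getD_empty, List.mem_flatMap, List.mem_cons, List.not_mem_nil, or_false]
  constructor
  · rintro (h | ⟨q, hq, hqe⟩)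
    · cases h
    rcases hqe with rfl | hqe
    · exact Or.inl hq
    · obtain ⟨q1, q2⟩ := q
      simp only [Prod.mk.injEq] at hqe
      obtain ⟨rfl, rfl⟩ := hqe
      exact Or.inr hq
  · rintro (h | h)
    · exact Or.inr ⟨(b, a), h, Or.inl rfl⟩
    · exact Or.inr ⟨(a, b), h, Or.inr rfl⟩

theorem pvGraphB_mem (friendships : List (Int × Int)) (a b : Int) :
    a ∈ (pvGraphB friendships).getD b PySem.Set.empty ↔
      (b, a) ∈ friendships ∨ (a, b) ∈ friendships := by
  rw [pvGraphB, show (fun (g : PySem.Dict Int (PySem.Set Int)) (p : Int × Int) =>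
      g.modify p.1 PySem.Set.empty (fun s => PySem.Set.add s p.2)) = pvAdd1 from rfl,
    pvFold1_mem]
  simp only [PySem.Dict.getD_empty, pvEdges, List.mem_append, List.mem_map]
  constructor
  · rintro (h | (h | ⟨q, hq, h⟩))
    · cases h
    · exact Or.inl h
    · obtain ⟨q1, q2⟩ := q
      simp only [Prod.mk.injEq] at h
      obtain ⟨rfl, rfl⟩ := h
      exact Or.inr hq
  · rintro (h | h)
    · exact Or.inr (Or.inl h)
    · exact Or.inr (Or.inr ⟨(a, b), h, rfl⟩)

theorem pvGraphB_keys (friendships : List (Int × Int)) (k : Int) :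
    k ∈ (pvGraphB friendships).keys ↔ ∃ p ∈ friendships, k = p.1 ∨ k = p.2 := by
  rw [pvGraphB, show (fun (g : PySem.Dict Int (PySem.Set Int)) (p : Int × Int) =>
      g.modify p.1 PySem.Set.empty (fun s => PySem.Set.add s p.2)) = pvAdd1 from rfl,
    pvFold1_keys]
  simp only [PySem.Dict.keys_empty, List.not_mem_nil, false_or, pvEdges, List.mem_append,
    List.mem_map]
  constructor
  · rintro ⟨q, (hq | ⟨p, hp, rfl⟩), rfl⟩
    · exact ⟨q, hq, Or.inl rfl⟩
    · exact ⟨p, hp, Or.inr rfl⟩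
  · rintro ⟨p, hp, (h | h)⟩
    · exact ⟨p, Or.inl hp, h⟩
    · exact ⟨(p.2, p.1), Or.inr ⟨p, hp, rfl⟩, h⟩

theorem pvGraphB_keys_nodup (friendships : List (Int × Int)) : (pvGraphB friendships).keys.Nodup := by
  rw [pvGraphB, show (fun (g : PySem.Dict Int (PySem.Set Int)) (p : Int × Int) =>
      g.modify p.1 PySem.Set.empty (fun s => PySem.Set.add s p.2)) = pvAdd1 from rfl]
  exact pvFold1_keys_nodup _ _ PySem.Dict.nodup_keys_empty

theorem pvGraphA_adj_nodup (friendships : List (Int × Int)) (b : Int) :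
    ((pvGraphA friendships).getD b PySem.Set.empty).Nodup := by
  rw [pvGraphA_eq_fold1]
  refine pvFold1_adj_nodup _ _ (fun b => by simp [PySem.Dict.getD_empty, PySem.Set.empty]) b

theorem pvGraphB_adj_nodup (friendships : List (Int × Int)) (b : Int) :
    ((pvGraphB friendships).getD b PySem.Set.empty).Nodup := by
  rw [pvGraphB, show (fun (g : PySem.Dict Int (PySem.Set Int)) (p : Int × Int) =>
      g.modify p.1 PySem.Set.empty (fun s => PySem.Set.add s p.2)) = pvAdd1 from rfl]
  refine pvFold1_adj_nodup _ _ (fun b => by simp [PySem.Dict.getD_empty, PySem.Set.empty]) b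

-- counting in a flatMap of nodup lists is countP of membership
theorem pvCount_flatMap (F : Int → List Int) (c : Int) (l : List Int)
    (h : ∀ f ∈ l, (F f).Nodup) :
    ((l.flatMap F).count c) = l.countP (fun f => decide (c ∈ F f)) := by
  induction l with
  | nil => rfl
  | cons f t ih =>
      simp only [List.flatMap_cons, List.count_append, List.countP_cons]
      rw [ih (fun x hx => h x (by simp [hx]))]
      by_cases hc : c ∈ F f
      · rw [List.count_eq_one_of_mem (h f (by simp)) hc]; simp [hc]; omega
      · rw [List.count_eq_zero.mpr hc]; simp [hc]

-- the heart: A's and B's per-user answers agree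
theorem pvRec_eq (friendships : List (Int × Int)) (i : Int) :
    pvRecA (pvGraphA friendships) i = pvBest (pvGraphB friendships) i := by
  set gA := pvGraphA friendships with hgA
  set gB := pvGraphB friendships with hgB
  have hmemEq : ∀ a b : Int, a ∈ gA.getD b PySem.Set.empty ↔ a ∈ gB.getD b PySem.Set.empty := by
    intro a b; rw [hgA, hgB, pvGraphA_mem, pvGraphB_mem]
  have hsym : ∀ a b : Int, a ∈ gA.getD b PySem.Set.empty ↔ b ∈ gA.getD a PySem.Set.empty := by
    intro a b; rw [hgA, pvGraphA_mem, pvGraphA_mem]; tauto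
  have hkey : ∀ a b : Int, a ∈ gA.getD b PySem.Set.empty → b ∈ gB.keys := by
    intro a b h
    rw [hgA, pvGraphA_mem] at h
    rw [hgB, pvGraphB_keys]
    rcases h with h | h
    · exact ⟨(b, a), h, Or.inl rfl⟩
    · exact ⟨(a, b), h, Or.inr rfl⟩
  have hvnA : ∀ b : Int, (gA.getD b PySem.Set.empty).Nodup := fun b => pvGraphA_adj_nodup _ b
  have hvnB : ∀ b : Int, (gB.getD b PySem.Set.empty).Nodup := fun b => pvGraphB_adj_nodup _ b
  have hndB : gB.keys.Nodup := pvGraphB_keys_nodup _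
  set adjA := gA.getD i PySem.Set.empty with hadjA
  set adjB := gB.getD i PySem.Set.empty with hadjB
  have hadjPerm : adjA.Perm adjB :=
    (List.perm_ext_iff_of_nodup (hvnA i) (hvnB i)).mpr (fun a => hmemEq a i)
  set cnt : Int → Nat := fun c => adjA.countP (fun f => decide (f ∈ gA.getD c PySem.Set.empty))
    with hcntdef
  set q1 : Int → Bool := fun s => decide (s ≠ i ∧ s ∉ adjA) with hq1
  set S0 : List Int := adjA.flatMap (fun f => gA.getD f PySem.Set.empty) with hS0
  set S : List Int := S0.filter q1 with hS
  -- A's counter is Counter(S)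
  have hif : (fun (c : PySem.Dict Int Int) (s : Int) =>
      if s ≠ i ∧ s ∉ adjA then c.modify s 0 (· + 1) else c)
      = (fun c s => if q1 s = true then c.modify s 0 (· + 1) else c) := by
    funext c s
    by_cases hs : s ≠ i ∧ s ∉ adjA <;> simp [hq1, hs]
  have hcounter : adjA.foldl (fun c f => (gA.getD f PySem.Set.empty).foldl
        (fun c s => if s ≠ i ∧ s ∉ adjA then c.modify s 0 (· + 1) else c) c)
        PySem.Dict.empty = PySem.Dict.counter S := by
    rw [← List.foldl_flatMap, ← hS0, hif, ← List.foldl_filter, ← hS,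
      PySem.Dict.counter_eq_foldl]
  -- A's counts are the cnt counts
  have hScount : ∀ k ∈ PySem.Set.ofList S,
      (fun k => (k, (S.count k : Int))) k = (fun k => (k, ((cnt k : Nat) : Int))) k := by
    intro k hk
    have hkS : k ∈ S := (PySem.Set.mem_ofList S k).mp hk
    have hq : q1 k = true := (List.mem_filter.mp hkS).2
    have hc : ((S.count k : Int)) = ((cnt k : Nat) : Int) := by
      rw [hS, List.count_filter hq, hS0,
        pvCount_flatMap _ _ _ (fun f _ => hvnA f)]
      exact congrArg _ (List.countP_congr (fun f _ => by
        simp only [decide_eq_true_eq]; exact hsym k f))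
    simp [hc]
  -- B's intersection sizes are the same counts
  have hcntB : ∀ j : Int,
      PySem.Set.len (PySem.Set.inter adjB (gB.getD j PySem.Set.empty)) = ((cnt j : Nat) : Int) := by
    intro j
    simp only [PySem.Set.len, PySem.Set.inter, ← List.countP_eq_length_filter, hcntdef]
    rw [hadjPerm.countP_eq]
    refine congrArg _ (List.countP_congr (fun f _ => ?_))
    simp only [PySem.Set.contains, List.contains_eq_mem, decide_eq_true_eq]
    exact (hmemEq f j).symm
  -- membership characterisations of the two candidate lists
  set q2 : Int → Bool := fun j =>
    decide (j ≠ i) && !(PySem.Set.contains adjB j)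
      && !(PySem.Set.isdisjoint adjB (gB.getD j PySem.Set.empty)) with hq2
  have hmemS : ∀ k : Int, k ∈ PySem.Set.ofList S ↔ (k ≠ i ∧ k ∉ adjA ∧ 0 < cnt k) := by
    intro k
    rw [PySem.Set.mem_ofList, hS, List.mem_filter, hS0, List.mem_flatMap]
    constructor
    · rintro ⟨⟨f, hf, hkf⟩, hq⟩
      have hq' := of_decide_eq_true hq
      refine ⟨hq'.1, hq'.2, ?_⟩
      rw [hcntdef]
      exact List.countP_pos_iff.mpr ⟨f, hf, decide_eq_true ((hsym k f).mp hkf)⟩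
    · rintro ⟨h1, h2, h3⟩
      rw [hcntdef] at h3
      obtain ⟨f, hf, hpf⟩ := List.countP_pos_iff.mp h3
      exact ⟨⟨f, hf, (hsym k f).mpr (of_decide_eq_true hpf)⟩, decide_eq_true ⟨h1, h2⟩⟩
  have hmemK : ∀ k : Int, k ∈ gB.keys.filter q2 ↔ (k ≠ i ∧ k ∉ adjA ∧ 0 < cnt k) := by
    intro k
    rw [List.mem_filter, hq2]
    have hdisj : PySem.Set.isdisjoint adjB (gB.getD k PySem.Set.empty) = false ↔ 0 < cnt k := by
      constructor
      · intro h
        have : ¬ (∀ x ∈ adjB, x ∉ gB.getD k PySem.Set.empty) := by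
          intro hall
          rw [(PySem.Set.isdisjoint_iff _ _).mpr hall] at h
          cases h
        push_neg at this
        obtain ⟨f, hf, hfk⟩ := this
        rw [hcntdef]
        refine List.countP_pos_iff.mpr ⟨f, hadjPerm.mem_iff.mpr hf, ?_⟩
        exact decide_eq_true ((hmemEq f k).mpr hfk)
      · intro h
        rw [hcntdef] at h
        obtain ⟨f, hf, hpf⟩ := List.countP_pos_iff.mp h
        rcases Bool.eq_false_or_eq_true (PySem.Set.isdisjoint adjB (gB.getD k PySem.Set.empty))
          with h0 | h0
        · exact absurd ((hmemEq f k).mp (of_decide_eq_true hpf))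
            ((PySem.Set.isdisjoint_iff _ _).mp h0 f (hadjPerm.mem_iff.mp hf))
        · exact h0
    have hcont : (PySem.Set.contains adjB k = false) ↔ k ∉ adjA := by
      rw [← Bool.not_eq_true, PySem.Set.contains_iff, hadjPerm.mem_iff]
    constructor
    · rintro ⟨-, hq⟩
      simp only [Bool.and_eq_true, decide_eq_true_eq, Bool.not_eq_true'] at hq
      exact ⟨hq.1.1, hcont.mp hq.1.2, hdisj.mp hq.2⟩
    · rintro ⟨h1, h2, h3⟩
      refine ⟨?_, ?_⟩
      · rw [hcntdef] at h3
        obtain ⟨f, hf, hpf⟩ := List.countP_pos_iff.mp h3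
        exact hkey f k (of_decide_eq_true hpf)
      · simp only [Bool.and_eq_true, decide_eq_true_eq, Bool.not_eq_true']
        exact ⟨⟨h1, hcont.mpr h2⟩, hdisj.mpr h3⟩
  -- the two candidate lists are permutations of each other
  set LB : List Int := gB.keys.filter q2 with hLB
  have hpermkeys : (PySem.Set.ofList S).Perm LB :=
    (List.perm_ext_iff_of_nodup (PySem.Set.nodup_ofList S) (hndB.filter q2)).mpr
      (fun k => (hmemS k).trans (hmemK k).symm)
  have hperm : ((PySem.Set.ofList S).map (fun k => (k, ((cnt k : Nat) : Int)))).Perm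
      (LB.map (fun k => (k, ((cnt k : Nat) : Int)))) :=
    hpermkeys.map _
  have hge1 : ∀ k ∈ LB, (1 : Int) ≤ ((cnt k : Nat) : Int) := by
    intro k hk
    have := ((hmemK k).mp hk).2.2
    omega
  have hstepA : (fun (st : Int × Int) (p : Int × Int) =>
      if p.2 > st.2 ∨ (p.2 = st.2 ∧ p.1 < st.1) then (p.1, p.2) else st) = pvStep := by
    funext st p; simp [pvStep]
  have hscored : LB.map (fun j =>
      (-(PySem.Set.len (PySem.Set.inter adjB (gB.getD j PySem.Set.empty))), j))
      = LB.map (fun k => (-((cnt k : Nat) : Int), k)) :=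
    List.map_congr_left (fun j _ => by rw [hcntB j])
  simp only [pvRecA, pvBest, ← hadjA, ← hadjB, hcounter, PySem.Dict.items_counter, hstepA,
    ← hq2, ← hLB, hscored]
  rw [List.map_congr_left hScount, pvFoldl_pvStep_perm hperm,
    pvMinFold (fun k => ((cnt k : Nat) : Int)) LB hge1]
  cases PySem.List.min2? (LB.map (fun k => (-((cnt k : Nat) : Int), k))) Prod.fst Prod.snd <;> rfl

-- A's write-into-[-1]*num loop is a map
theorem pvSetLoop (f : Int → Int) (n : Nat) : ∀ (r : List Int), n ≤ r.length →
    (PySem.List.pyRange 0 (n : Int) 1).foldl (fun r i => PySem.List.pySetD r i (f i)) r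
      = (PySem.List.pyRange 0 (n : Int) 1).map f ++ r.drop n := by
  induction n with
  | zero =>
      intro r _
      rw [PySem.List.pyRange_one_eq_nil (by omega)]
      simp
  | succ n ih =>
      intro r hr
      have hcast : ((n + 1 : Nat) : Int) = (n : Int) + 1 := by push_cast; ring
      rw [hcast, PySem.List.pyRange_one_succ_right (by positivity)]
      rw [List.foldl_append, List.map_append, ih r (by omega)]
      simp only [List.foldl_cons, List.foldl_nil, List.map_cons, List.map_nil]
      have hlen : ((PySem.List.pyRange 0 (n : Int) 1).map f).length = n := by
        simp [PySem.List.length_pyRange_one]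
      have hltot : n < r.length := by omega
      have hset : PySem.List.pySetD ((PySem.List.pyRange 0 (n : Int) 1).map f ++ r.drop n) (n : Int) (f n)
          = ((PySem.List.pyRange 0 (n : Int) 1).map f ++ r.drop n).set n (f n) := by
        have hlen2 : n < ((PySem.List.pyRange 0 (n : Int) 1).map f ++ r.drop n).length := by
          simp [hlen]; omega
        simp [PySem.List.pySetD, PySem.List.pySet?_natCast _ _ _ hlen2]
      rw [hset, List.set_append, if_neg (by omega), hlen, Nat.sub_self,
          List.drop_eq_getElem_cons hltot, List.set_cons_zero]
      simp [List.append_assoc]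

-- ===== VERDICT (by name: the statement is the Claim_ definition above) =====
theorem get_recommended_friends_spec : Claim_equal_get_recommended_friends := by
  intro num friendships _
  unfold Spec_get_recommended_friends get_recommended_friends get_recommended_friends_alt
  simp only
  by_cases hn : 0 ≤ num
  · have hnum : num = ((num.toNat : Nat) : Int) := (Int.toNat_of_nonneg hn).symm
    rw [PySem.List.pyRepeat_singleton, hnum]
    simp only [Int.toNat_natCast]
    rw [pvSetLoop (pvRecA (pvGraphA friendships)) num.toNat
      (List.replicate num.toNat (-1 : Int)) (by simp)]
    rw [List.drop_replicate]
    simp only [Nat.sub_self, List.replicate_zero, List.append_nil]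
    exact List.map_congr_left (fun x _ => pvRec_eq friendships x)
  · have hn0 : num ≤ 0 := by omega
    rw [PySem.List.pyRange_one_eq_nil hn0, PySem.List.pyRepeat_singleton]
    simp [Int.toNat_of_nonpos hn0]
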